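-- pv_equiv track=rewrite | github.com/aws-samples/region-migration-tools | rct/region_compare/app.py | get_from_data
-- ===== SOURCE A (Python) =====
-- def get_from_data(region1, region2, data):
--     reg1 = []
--     reg2 = []
--     both = []
--     for key in data:
--         if (
--             region1 in data[key]
--             and data[key][region1] == key
--             and region2 in data[key]
--             and data[key][region2] == key
--         ):
--             both.append(key)
--         else:
--             if region1 in data[key] and data[key][region1] == key:
--                 reg1.append(key)
--             if region2 in data[key] and data[key][region2] == key:
--                 reg2.append(key)
--     return (reg1, reg2, both)
-- ===== SOURCE B (Python) =====
-- def get_from_data(region1, region2, data):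
--     def m(r, k):
--         return data[k].get(r) == k
--     reg1 = [k for k in data if m(region1, k) and not m(region2, k)]
--     reg2 = [k for k in data if m(region2, k) and not m(region1, k)]
--     both = [k for k in data if m(region1, k) and m(region2, k)]
--     return (reg1, reg2, both)
-- ===== Notes on version B (the rewrite author's own statement) =====
-- stated objective: alternative
-- what changed: Replaces the single pass with a branching accumulator over three lists by three independent filtering comprehensions, each characterizing one output class directly by a dict.get-based predicate.
import Mathlib
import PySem

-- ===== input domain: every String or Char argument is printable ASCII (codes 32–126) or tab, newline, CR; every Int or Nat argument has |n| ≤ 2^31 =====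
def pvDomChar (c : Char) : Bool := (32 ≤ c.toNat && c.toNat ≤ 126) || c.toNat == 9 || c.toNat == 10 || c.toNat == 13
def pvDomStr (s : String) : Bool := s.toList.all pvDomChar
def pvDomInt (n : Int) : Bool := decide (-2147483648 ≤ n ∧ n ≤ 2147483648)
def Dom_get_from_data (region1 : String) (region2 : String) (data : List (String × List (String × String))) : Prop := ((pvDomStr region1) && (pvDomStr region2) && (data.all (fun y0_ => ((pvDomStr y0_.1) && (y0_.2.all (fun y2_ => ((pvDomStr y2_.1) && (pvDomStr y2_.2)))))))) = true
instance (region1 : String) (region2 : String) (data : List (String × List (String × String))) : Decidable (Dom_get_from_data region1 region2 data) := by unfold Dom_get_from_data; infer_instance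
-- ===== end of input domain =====

-- B replaces A's single pass with a three-way branching accumulator by three independent
-- filtering scans, one per output class (objective: alternative; return value only).

-- ===== PORT A =====
-- `region1 in data[key] and data[key][region1] == key`: the membership test guards the lookup,
-- so getD with "" is exact; data[key] with key drawn from the dict's own keys is exact via getD [].
def pvHitA (data : List (String × List (String × String))) (r k : String) : Bool :=
  let dk := PySem.Dict.mk ((PySem.Dict.mk data).getD k [])
  dk.contains r && (dk.getD r "" == k)

def get_from_data (region1 : String) (region2 : String) (data : List (String × List (String × String))) : List String × List String × List String :=
  data.foldl
    (fun (st : List String × List String × List String) p =>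
      let key := p.1
      if pvHitA data region1 key && pvHitA data region2 key then
        (st.1, st.2.1, st.2.2 ++ [key])
      else
        let reg1 := if pvHitA data region1 key then st.1 ++ [key] else st.1
        let reg2 := if pvHitA data region2 key then st.2.1 ++ [key] else st.2.1
        (reg1, reg2, st.2.2))
    ([], [], [])

-- ===== PORT B =====
-- `data[k].get(r) == k` (values are strings, so None never equals k)
def pvMatchB (data : List (String × List (String × String))) (r k : String) : Bool :=
  (PySem.Dict.mk ((PySem.Dict.mk data).getD k [])).get? r == some k

def get_from_data_alt (region1 : String) (region2 : String) (data : List (String × List (String × String))) : List String × List String × List String :=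
  let keys := data.map (·.1)
  (keys.filter (fun k => pvMatchB data region1 k && !pvMatchB data region2 k),
   keys.filter (fun k => pvMatchB data region2 k && !pvMatchB data region1 k),
   keys.filter (fun k => pvMatchB data region1 k && pvMatchB data region2 k))

-- ===== PRECONDITION & SPEC =====
def Spec_get_from_data (region1 : String) (region2 : String) (data : List (String × List (String × String))) (out : List String × List String × List String) : Prop := out = get_from_data_alt region1 region2 data
instance (region1 : String) (region2 : String) (data : List (String × List (String × String))) (out : List String × List String × List String) : Decidable (Spec_get_from_data region1 region2 data out) := by unfold Spec_get_from_data; infer_instance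

-- ===== CLAIM (what is proved, stated in full; the proofs are below) =====
def Claim_equal_get_from_data : Prop := ∀ (region1 : String) (region2 : String) (data : List (String × List (String × String))), Dom_get_from_data region1 region2 data → Spec_get_from_data region1 region2 data (get_from_data region1 region2 data)

-- ===== LEMMAS AND PROOFS =====

-- A's and B's per-key predicates coincide.
theorem hitA_eq_matchB (data : List (String × List (String × String))) (r k : String) :
    pvHitA data r k = pvMatchB data r k := by
  unfold pvHitA pvMatchB
  generalize (PySem.Dict.mk data).getD k [] = l
  dsimp only
  rw [PySem.Dict.contains_eq_isSome_get?, PySem.Dict.getD_eq_get?_getD]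
  cases (PySem.Dict.mk l).get? r <;> simp

-- A's fold, run from arbitrary accumulators, appends exactly the three filters of the keys.
theorem foldA_eq_filters (h1 h2 : String → Bool) (L : List (String × List (String × String)))
    (a b c : List String) :
    L.foldl
      (fun (st : List String × List String × List String) p =>
        let key := p.1
        if h1 key && h2 key then
          (st.1, st.2.1, st.2.2 ++ [key])
        else
          let reg1 := if h1 key then st.1 ++ [key] else st.1
          let reg2 := if h2 key then st.2.1 ++ [key] else st.2.1
          (reg1, reg2, st.2.2))
      (a, b, c)
    = (a ++ (L.map (·.1)).filter (fun k => h1 k && !h2 k),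
       b ++ (L.map (·.1)).filter (fun k => h2 k && !h1 k),
       c ++ (L.map (·.1)).filter (fun k => h1 k && h2 k)) := by
  induction L generalizing a b c with
  | nil => simp
  | cons p L ih =>
    by_cases e1 : h1 p.1 <;> by_cases e2 : h2 p.1 <;>
      simp only [List.foldl_cons, e1, e2, Bool.and_self, Bool.and_true, Bool.and_false,
        if_true, List.map_cons, List.filter_cons, Bool.not_true, Bool.not_false] <;>
      rw [ih] <;> simp

-- ===== VERDICT (by name: the statement is the Claim_ definition above) =====
theorem get_from_data_spec : Claim_equal_get_from_data := by
  intro region1 region2 data _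
  show get_from_data region1 region2 data = get_from_data_alt region1 region2 data
  unfold get_from_data get_from_data_alt
  rw [foldA_eq_filters (pvHitA data region1) (pvHitA data region2)]
  simp [hitA_eq_matchB]
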